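-- pv_equiv track=rewrite | github.com/OCboy5/vpsweb | src/vpsweb/utils/article_generator.py | _extract_translation_text
-- ===== SOURCE A (Python) =====
-- def _extract_translation_text(final_translation: str) -> tuple[str, str, str]:
--     """Extract target language title, poet name, and clean translation text.
--
--     Returns:
--         Tuple of (target_lang_title, target_lang_poet_name, clean_translation_text)
--     """
--     lines = final_translation.strip().split("\n")
--     translation_lines = []
--     target_lang_title = ""
--     target_lang_poet = ""
--
--     for i, line in enumerate(lines):
--         line = line.strip()
--
--         # Extract target language title from first non-empty line
--         if i == 0 and line:
--             target_lang_title = line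
--             continue
--
--         # Extract target language poet name from second line (after title)
--         # This could be "By Poet Name" or just "Poet Name" depending on formatting
--         if i == 1 and line:
--             target_lang_poet = line
--             continue
--
--         # Skip translation lines that happen to start with "By " but are not poet attribution
--         if (
--             line.startswith("By ") and len(line.split()) > 3
--         ):  # Likely "By error I fell..." type of line
--             # This is a translation line, not poet attribution, so treat it as translation content
--             translation_lines.append(line)
--             continue
--
--         # Skip empty lines
--         if not line:
--             continue
--
--         # Add to translation text
--         translation_lines.append(line)
--
--     clean_translation = "\n".join(translation_lines)
--     return target_lang_title, target_lang_poet, clean_translation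
-- ===== SOURCE B (Python) =====
-- def _extract_translation_text(final_translation: str) -> tuple[str, str, str]:
--     """Recursive decomposition: header fields by pattern on the line list,
--     body built directly by right-recursion (no intermediate list, no join)."""
--
--     def body(ls: list[str]) -> str:
--         if not ls:
--             return ""
--         rest = body(ls[1:])
--         head = ls[0].strip()
--         if not head:
--             return rest
--         if not rest:
--             return head
--         return head + "\n" + rest
--
--     lines = final_translation.strip().split("\n")
--     if len(lines) == 1:
--         return lines[0].strip(), "", ""
--     return lines[0].strip(), lines[1].strip(), body(lines[2:])
-- ===== Notes on version B (the rewrite author's own statement) =====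
-- stated objective: alternative
-- what changed: Replaces A's single forward enumerate loop (index branches for title/poet, list accumulator joined at the end) by a recursive decomposition: header fields taken by pattern on the line list length, and the body string built directly by right-recursion over lines[2:] with no accumulator list and no join (A's 'By ...' branch is dead code since it appends exactly like the default branch).
import Mathlib
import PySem

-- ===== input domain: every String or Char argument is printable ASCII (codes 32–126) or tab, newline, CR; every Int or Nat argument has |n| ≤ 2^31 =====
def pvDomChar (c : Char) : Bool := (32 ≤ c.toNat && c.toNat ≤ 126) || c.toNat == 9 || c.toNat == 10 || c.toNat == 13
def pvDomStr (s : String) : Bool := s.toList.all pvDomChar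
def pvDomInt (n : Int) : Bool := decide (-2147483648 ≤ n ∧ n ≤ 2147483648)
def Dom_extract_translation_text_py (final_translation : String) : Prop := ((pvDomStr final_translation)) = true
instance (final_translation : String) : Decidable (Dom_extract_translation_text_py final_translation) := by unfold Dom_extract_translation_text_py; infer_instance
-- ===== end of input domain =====

-- B replaces A's forward enumerate-loop/accumulator/join with a recursive decomposition:
-- header by pattern on the line list, body built by right-recursion with direct string concatenation.

-- ===== PORT A =====
-- lines = final_translation.strip().split("\n"); sep "\n" ≠ "" so split? is always some (exact)
def pvLines (s : String) : List String :=
  (PySem.Str.split? (PySem.Str.strip s) "\n").getD []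

-- state: (translation_lines, target_lang_title, target_lang_poet)
def pvAStep (st : List String × String × String) (p : Int × String) :
    List String × String × String :=
  let line := PySem.Str.strip p.2
  if p.1 = 0 ∧ line ≠ "" then (st.1, line, st.2.2)
  else if p.1 = 1 ∧ line ≠ "" then (st.1, st.2.1, line)
  else if PySem.Str.startswith line "By " = true ∧ (PySem.Str.split₀ line).length > 3 then
    (st.1 ++ [line], st.2.1, st.2.2)
  else if line = "" then st
  else (st.1 ++ [line], st.2.1, st.2.2)

def extract_translation_text_py (final_translation : String) : String × String × String :=
  let lines := pvLines final_translation
  let r := (PySem.List.enumerate lines 0).foldl pvAStep ([], "", "")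
  (r.2.1, r.2.2, PySem.Str.join "\n" r.1)

-- ===== PORT B =====
-- body(ls): recursion on the list, building the joined string directly
def pvBody : List String → String
  | [] => ""
  | l :: ls =>
    let rest := pvBody ls
    let head := PySem.Str.strip l
    if head = "" then rest
    else if rest = "" then head
    else head ++ "\n" ++ rest

def extract_translation_text_py_alt (final_translation : String) : String × String × String :=
  match pvLines final_translation with
  | [a] => (PySem.Str.strip a, "", "")
  | a :: b :: rest => (PySem.Str.strip a, PySem.Str.strip b, pvBody rest)
  | [] => ("", "", "")   -- unreachable in Python (split never yields []); kept for totality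

-- ===== PRECONDITION & SPEC =====
def Spec_extract_translation_text_py (final_translation : String) (out : String × String × String) : Prop := out = extract_translation_text_py_alt final_translation
instance (final_translation : String) (out : String × String × String) : Decidable (Spec_extract_translation_text_py final_translation out) := by unfold Spec_extract_translation_text_py; infer_instance

-- ===== CLAIM (what is proved, stated in full; the proofs are below) =====
def Claim_equal_extract_translation_text_py : Prop := ∀ (final_translation : String), Dom_extract_translation_text_py final_translation → Spec_extract_translation_text_py final_translation (extract_translation_text_py final_translation)

-- ===== LEMMAS AND PROOFS =====

-- from index 2 on, A's loop just appends every nonempty stripped line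
theorem pvA_tail (rest : List String) : ∀ (start : Int) (acc : List String) (t p : String),
    2 ≤ start →
    (PySem.List.enumerate rest start).foldl pvAStep (acc, t, p)
      = (acc ++ (rest.map PySem.Str.strip).filter (fun l => l ≠ ""), t, p) := by
  induction rest with
  | nil => intro start acc t p _; simp [PySem.List.enumerate_nil]
  | cons x xs ih =>
    intro start acc t p h
    rw [PySem.List.enumerate_cons, List.foldl_cons]
    by_cases hx : PySem.Str.strip x = ""
    · have : pvAStep (acc, t, p) (start, x) = (acc, t, p) := by
        simp only [pvAStep, hx]
        have h0 : ¬ (start = 0) := by omega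
        have h1 : ¬ (start = 1) := by omega
        simp [h0, h1, (by decide : PySem.Chars.startswith [] ['B','y',' '] = false)]
      rw [this, ih (start + 1) acc t p (by omega)]
      simp [hx]
    · have : pvAStep (acc, t, p) (start, x) = (acc ++ [PySem.Str.strip x], t, p) := by
        simp only [pvAStep]
        have h0 : ¬ (start = 0) := by omega
        have h1 : ¬ (start = 1) := by omega
        split_ifs <;> simp_all
      rw [this, ih (start + 1) (acc ++ [PySem.Str.strip x]) t p (by omega)]
      simp [hx]

theorem pvA_head (l : String) (acc : List String) (p : String) :
    pvAStep (acc, "", p) (0, l) = (acc, PySem.Str.strip l, p) := by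
  by_cases hl : PySem.Str.strip l = ""
  · simp [pvAStep, hl, (by decide : PySem.Chars.startswith [] ['B','y',' '] = false)]
  · simp [pvAStep, hl]

theorem pvA_second (l : String) (acc : List String) (t : String) :
    pvAStep (acc, t, "") (1, l) = (acc, t, PySem.Str.strip l) := by
  by_cases hl : PySem.Str.strip l = ""
  · simp [pvAStep, hl, (by decide : PySem.Chars.startswith [] ['B','y',' '] = false)]
  · simp [pvAStep, hl]

-- join over Str: cons-cons and singleton shapes, and nonemptiness with a nonempty head
theorem pvJoin_cons_cons (x y : String) (r : List String) :
    PySem.Str.join "\n" (x :: y :: r) = x ++ "\n" ++ PySem.Str.join "\n" (y :: r) := by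
  apply String.toList_inj.mp
  simp [PySem.Str.toList_join, PySem.Chars.join, List.intercalate]

theorem pvJoin_singleton (x : String) : PySem.Str.join "\n" [x] = x := by
  apply String.toList_inj.mp
  simp [PySem.Str.toList_join, PySem.Chars.join, List.intercalate]

theorem pvJoin_ne_empty (y : String) (r : List String) (hy : y ≠ "") :
    PySem.Str.join "\n" (y :: r) ≠ "" := by
  intro hcontra
  have h0 : (PySem.Str.join "\n" (y :: r)).toList = [] := by rw [hcontra]; rfl
  rw [PySem.Str.toList_join] at h0
  have hynil : y.toList = [] := by
    cases r with
    | nil => simpa [PySem.Chars.join, List.intercalate] using h0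
    | cons z r' =>
      simp only [PySem.Chars.join, List.map_cons, List.intercalate, List.intersperse,
        List.flatten] at h0
      exact (List.append_eq_nil_iff.mp h0).1
  exact hy (String.toList_inj.mp hynil)

-- join of the nonempty stripped lines = B's right-recursion
theorem pvBody_eq_join (ls : List String) :
    PySem.Str.join "\n" ((ls.map PySem.Str.strip).filter (fun l => l ≠ "")) = pvBody ls := by
  induction ls with
  | nil => rfl
  | cons x xs ih =>
    by_cases hx : PySem.Str.strip x = ""
    · simpa [pvBody, List.filter_cons, hx] using ih
    · simp only [List.map_cons, List.filter_cons, hx, ne_eq, not_false_iff, decide_true,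
        if_true, pvBody]
      rw [← ih]
      match hf : (xs.map PySem.Str.strip).filter (fun l => l ≠ "") with
      | [] =>
        rw [show PySem.Str.join "\n" ([] : List String) = "" from rfl, if_neg not_false, if_pos rfl]
        exact pvJoin_singleton _
      | y :: r =>
        have hy : y ≠ "" := by
          have := List.of_mem_filter (a := y) (l := xs.map PySem.Str.strip)
            (p := fun l => decide (l ≠ "")) (by rw [hf]; exact List.mem_cons_self)
          simpa using this
        rw [if_neg not_false, if_neg (pvJoin_ne_empty y r hy)]
        exact pvJoin_cons_cons _ _ _

-- ===== VERDICT (by name: the statement is the Claim_ definition above) =====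
theorem extract_translation_text_py_spec : Claim_equal_extract_translation_text_py := by
  intro s _
  unfold Spec_extract_translation_text_py extract_translation_text_py extract_translation_text_py_alt
  match hl : pvLines s with
  | [] => simp [PySem.List.enumerate_nil, PySem.Str.join]
  | [a] =>
    simp only [PySem.List.enumerate_cons, PySem.List.enumerate_nil, List.foldl_cons,
      List.foldl_nil, pvA_head]
    rfl
  | a :: b :: rest =>
    simp only [PySem.List.enumerate_cons, List.foldl_cons, pvA_head]
    rw [show ((0 : Int) + 1) = 1 by norm_num, pvA_second,
      show ((1 : Int) + 1) = 2 by norm_num,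
      pvA_tail rest 2 [] (PySem.Str.strip a) (PySem.Str.strip b) (by norm_num)]
    have := pvBody_eq_join rest
    simp only [ne_eq, decide_not] at this
    simp [this]
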